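-- pv_equiv track=rewrite | github.com/YachaTree/programmers | 프로그래머스/4/64063. 호텔 방 배정/호텔 방 배정.py | solution
-- ===== SOURCE A (Python) =====
-- def solution(k, room_number):
--     parent = {}
--
--     def find(x):
--         path = []
--         while x in parent:
--             path.append(x)
--             x = parent[x]
--         for p in path:
--             parent[p] = x
--         return x
--
--     answer = []
--     for room in room_number:
--         empty = find(room)
--         parent[empty] = empty + 1
--         answer.append(empty)
--
--     return answer
-- ===== SOURCE B (Python) =====
-- def solution(k, room_number):
--     # Occupied rooms kept as a sorted list of disjoint intervals [s, e)
--     # (each interval lies strictly left of the next one's start).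
--     intervals = []
--     answer = []
--     for x in room_number:
--         # split off the intervals lying entirely left of x
--         pre = []
--         i = 0
--         while i < len(intervals) and intervals[i][1] < x:
--             pre.append(intervals[i])
--             i += 1
--         rest = intervals[i:]
--         if not rest:
--             ans = x
--             new_rest = [(x, x + 1)]
--         else:
--             s, e = rest[0]
--             if x + 1 < s:
--                 ans = x
--                 new_rest = [(x, x + 1)] + rest
--             elif x + 1 == s:
--                 ans = x
--                 new_rest = [(x, e)] + rest[1:]
--             elif len(rest) > 1 and rest[1][0] == e + 1:
--                 ans = e
--                 new_rest = [(s, rest[1][1])] + rest[2:]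
--             else:
--                 ans = e
--                 new_rest = [(s, e + 1)] + rest[1:]
--         intervals = pre + new_rest
--         answer.append(ans)
--     return answer
-- ===== Notes on version B (the rewrite author's own statement) =====
-- stated objective: alternative
-- what changed: Replaces A's union-find parent dict (chase parent pointers, then compress the path) with a different data structure: a sorted list of disjoint occupied intervals [s,e); each room is assigned by scanning to its interval and doing an insert / left-merge / extend-and-right-merge on that list.
import Mathlib
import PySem

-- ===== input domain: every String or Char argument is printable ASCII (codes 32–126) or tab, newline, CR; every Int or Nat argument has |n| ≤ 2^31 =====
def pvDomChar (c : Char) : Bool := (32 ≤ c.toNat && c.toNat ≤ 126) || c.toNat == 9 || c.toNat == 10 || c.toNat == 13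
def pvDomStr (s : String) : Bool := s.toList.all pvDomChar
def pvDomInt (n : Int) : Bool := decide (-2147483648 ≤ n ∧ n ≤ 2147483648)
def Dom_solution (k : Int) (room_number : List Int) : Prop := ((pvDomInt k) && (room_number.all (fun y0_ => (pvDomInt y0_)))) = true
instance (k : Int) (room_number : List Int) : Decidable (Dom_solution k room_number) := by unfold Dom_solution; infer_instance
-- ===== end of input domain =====

-- B replaces A's union-find dict (parent pointers + path compression) by a sorted list of
-- disjoint occupied intervals maintained by skip/extend/merge; same answers, a genuinely
-- different data structure (objective: alternative).


-- ===== PORT A =====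
-- A's `while x in parent: path.append(x); x = parent[x]`, fueled by |parent|+1
-- (the chain visits distinct keys, so the fuel is never exhausted on reachable dicts).
def findLoopA (d : PySem.Dict Int Int) : Nat → Int → List Int → List Int × Int
  | 0, x, path => (path, x)
  | fuel + 1, x, path =>
    match d.get? x with
    | none => (path, x)
    | some v => findLoopA d fuel v (path ++ [x])

-- A's find: walk to the root collecting the path, then `for p in path: parent[p] = x`.
def findA (d : PySem.Dict Int Int) (x : Int) : Int × PySem.Dict Int Int :=
  let pr := findLoopA d (d.size + 1) x []
  (pr.2, pr.1.foldl (fun d' p => d'.insert p pr.2) d)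

def solution (k : Int) (room_number : List Int) : List Int :=
  (room_number.foldl
    (fun (st : PySem.Dict Int Int × List Int) room =>
      let fr := findA st.1 room
      (fr.2.insert fr.1 (fr.1 + 1), st.2 ++ [fr.1]))
    (PySem.Dict.empty, [])).2

-- ===== PORT B =====
-- B's `while i < n and intervals[i][1] < x: pre.append(intervals[i]); i += 1`:
-- split the interval list into the skipped prefix and the remaining suffix.
def skipB : List (Int × Int) → Int → List (Int × Int) × List (Int × Int)
  | [], _ => ([], [])
  | (s, e) :: rest, x =>
    if e < x then
      let pr := skipB rest x
      ((s, e) :: pr.1, pr.2)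
    else ([], (s, e) :: rest)

-- B's if/elif/else on the suffix `rest`: insert / merge-left / extend(+merge-right).
def headB : List (Int × Int) → Int → Int × List (Int × Int)
  | [], x => (x, [(x, x + 1)])
  | (s, e) :: tail, x =>
    if x + 1 < s then (x, (x, x + 1) :: (s, e) :: tail)
    else if x + 1 = s then (x, (x, e) :: tail)
    else
      match tail with
      | (s2, e2) :: tail2 =>
        if s2 = e + 1 then (e, (s, e2) :: tail2) else (e, (s, e + 1) :: (s2, e2) :: tail2)
      | [] => (e, [(s, e + 1)])

-- one loop iteration: `intervals = pre + new_rest; answer.append(ans)`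
def stepB (ivs : List (Int × Int)) (x : Int) : Int × List (Int × Int) :=
  let pr := skipB ivs x
  let hr := headB pr.2 x
  (hr.1, pr.1 ++ hr.2)

def solution_alt (k : Int) (room_number : List Int) : List Int :=
  (room_number.foldl
    (fun (st : List (Int × Int) × List Int) x =>
      let pr := stepB st.1 x
      (pr.2, st.2 ++ [pr.1]))
    ([], [])).2

-- ===== PRECONDITION & SPEC =====
def Spec_solution (k : Int) (room_number : List Int) (out : List Int) : Prop := out = solution_alt k room_number
instance (k : Int) (room_number : List Int) (out : List Int) : Decidable (Spec_solution k room_number out) := by unfold Spec_solution; infer_instance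

-- ===== CLAIM (what is proved, stated in full; the proofs are below) =====
def Claim_equal_solution : Prop := ∀ (k : Int) (room_number : List Int), Dom_solution k room_number → Spec_solution k room_number (solution k room_number)

-- ===== LEMMAS AND PROOFS =====

-- "y is the first free room ≥ x with respect to the occupied predicate P."
def FirstFree (P : Int → Prop) (x y : Int) : Prop :=
  x ≤ y ∧ ¬ P y ∧ ∀ z, x ≤ z → z < y → P z

theorem FirstFree_unique {P : Int → Prop} {x y y' : Int} (h : FirstFree P x y)
    (h' : FirstFree P x y') : y = y' := by
  obtain ⟨hx, hy, hall⟩ := h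
  obtain ⟨hx', hy', hall'⟩ := h'
  by_contra hne
  rcases lt_or_gt_of_ne hne with hlt | hlt
  · exact hy (hall' y hx hlt)
  · exact hy' (hall y' hx' hlt)

theorem FirstFree_congr {P Q : Int → Prop} {x y : Int} (hPQ : ∀ z, P z ↔ Q z)
    (h : FirstFree P x y) : FirstFree Q x y :=
  ⟨h.1, fun hm => h.2.1 ((hPQ y).2 hm), fun z h1 h2 => (hPQ z).1 (h.2.2 z h1 h2)⟩

-- ---------- A side ----------

-- The invariant A's dict maintains: every entry p ↦ v has p < v and [p, v) ⊆ keys.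
def DictInv (d : PySem.Dict Int Int) : Prop :=
  ∀ p v, d.get? p = some v → p < v ∧ ∀ z, p ≤ z → z < v → z ∈ d.keys

theorem mem_keys_of_get?_eq_some {d : PySem.Dict Int Int} {x v : Int}
    (h : d.get? x = some v) : x ∈ d.keys := by
  by_contra hmem
  rw [(PySem.Dict.get?_eq_none_iff_not_mem_keys d x).2 hmem] at h
  simp at h

-- The fuel measure: the number of keys ≥ x strictly drops when we jump from a key x to w > x.
theorem filter_measure_lt {K : List Int} {x w : Int} (hx : x ∈ K) (hlt : x < w) :
    (K.filter (fun z => decide (w ≤ z))).length < (K.filter (fun z => decide (x ≤ z))).length := by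
  have hsub : (K.filter (fun z => decide (w ≤ z))).Sublist (K.filter (fun z => decide (x ≤ z))) :=
    List.monotone_filter_right K (fun a h => by simp at h ⊢; omega)
  have hxin : x ∈ K.filter (fun z => decide (x ≤ z)) := List.mem_filter.2 ⟨hx, by simp⟩
  have hxout : x ∉ K.filter (fun z => decide (w ≤ z)) := by
    intro hm
    have := (List.mem_filter.1 hm).2
    simp at this
    omega
  rcases lt_or_eq_of_le hsub.length_le with h | h
  · exact h
  · exact absurd (hsub.eq_of_length h ▸ hxin) hxout

theorem filter_le_size (d : PySem.Dict Int Int) (x : Int) :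
    (d.keys.filter (fun z => decide (x ≤ z))).length < d.size + 1 := by
  have h1 := List.length_filter_le (fun z => decide (x ≤ z)) d.keys
  have h2 : d.keys.length = d.size := by
    simp [PySem.Dict.keys, PySem.Dict.size]
  omega

theorem findLoopA_spec (d : PySem.Dict Int Int) (hInv : DictInv d) :
    ∀ (fuel : Nat) (x : Int) (acc : List Int),
      (d.keys.filter (fun z => decide (x ≤ z))).length < fuel →
      ∃ extra r, findLoopA d fuel x acc = (acc ++ extra, r) ∧ FirstFree (· ∈ d.keys) x r ∧
        ∀ p ∈ extra, x ≤ p ∧ p < r ∧ p ∈ d.keys := by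
  intro fuel
  induction fuel with
  | zero => intro x acc h; omega
  | succ n ih =>
    intro x acc h
    cases hg : d.get? x with
    | none =>
      refine ⟨[], x, ?_, ⟨le_refl x, ?_, fun z h1 h2 => absurd h2 (by omega)⟩, by simp⟩
      · simp [findLoopA, hg]
      · exact (PySem.Dict.get?_eq_none_iff_not_mem_keys d x).1 hg
    | some v =>
      obtain ⟨hxv, hint⟩ := hInv x v hg
      have hxK : x ∈ d.keys := mem_keys_of_get?_eq_some hg
      have hmeas := filter_measure_lt hxK hxv
      obtain ⟨extra, r, heq, hfree, hprops⟩ := ih v (acc ++ [x]) (by omega)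
      refine ⟨x :: extra, r, ?_, ?_, ?_⟩
      · simp only [findLoopA, hg]
        rw [heq]; simp
      · obtain ⟨hvr, hrK, hall⟩ := hfree
        refine ⟨by omega, hrK, fun z h1 h2 => ?_⟩
        by_cases hzv : z < v
        · exact hint z h1 hzv
        · exact hall z (by omega) h2
      · intro p hp
        rcases List.mem_cons.1 hp with rfl | hp'
        · exact ⟨le_refl p, by have := hfree.1; omega, hxK⟩
        · obtain ⟨h1, h2, h3⟩ := hprops p hp'
          exact ⟨by omega, h2, h3⟩

theorem compress_spec (r : Int) :
    ∀ (l : List Int) (d : PySem.Dict Int Int), DictInv d →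
      (∀ p ∈ l, p ∈ d.keys ∧ p < r ∧ ∀ z, p ≤ z → z < r → z ∈ d.keys) →
      (l.foldl (fun d' p => d'.insert p r) d).keys = d.keys ∧
      DictInv (l.foldl (fun d' p => d'.insert p r) d) := by
  intro l
  induction l with
  | nil => intro d hInv _; exact ⟨rfl, hInv⟩
  | cons p l ih =>
    intro d hInv hprops
    obtain ⟨hpK, hpr, hpint⟩ := hprops p (List.mem_cons_self ..)
    have hcont : d.contains p = true := (PySem.Dict.contains_iff_mem_keys d p).2 hpK
    have hkeys : (d.insert p r).keys = d.keys := PySem.Dict.keys_insert_of_contains d r hcont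
    have hInv' : DictInv (d.insert p r) := by
      intro q v hq
      rw [PySem.Dict.get?_insert] at hq
      split_ifs at hq with hqp
      · subst hqp
        obtain rfl : v = r := by injection hq with h; omega
        exact ⟨hpr, fun z h1 h2 => by rw [hkeys]; exact hpint z h1 h2⟩
      · obtain ⟨h1, h2⟩ := hInv q v hq
        exact ⟨h1, fun z hz1 hz2 => by rw [hkeys]; exact h2 z hz1 hz2⟩
    simp only [List.foldl_cons]
    obtain ⟨hk, hi⟩ := ih (d.insert p r) hInv' (by
      intro q hq
      obtain ⟨h1, h2, h3⟩ := hprops q (List.mem_cons_of_mem _ hq)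
      rw [hkeys]
      exact ⟨h1, h2, h3⟩)
    exact ⟨hk.trans hkeys, hi⟩

theorem findA_spec (d : PySem.Dict Int Int) (x : Int) (hInv : DictInv d) :
    FirstFree (· ∈ d.keys) x (findA d x).1 ∧ (findA d x).2.keys = d.keys ∧ DictInv (findA d x).2 := by
  obtain ⟨extra, r, heq, hfree, hprops⟩ :=
    findLoopA_spec d hInv (d.size + 1) x [] (filter_le_size d x)
  have h1 : (findA d x).1 = r := by simp [findA, heq]
  have h2 : (findA d x).2 = extra.foldl (fun d' p => d'.insert p r) d := by
    simp [findA, heq]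
  obtain ⟨hk, hi⟩ := compress_spec r extra d hInv (by
    intro p hp
    obtain ⟨hxp, hpr, hpK⟩ := hprops p hp
    exact ⟨hpK, hpr, fun z hz1 hz2 => hfree.2.2 z (by omega) hz2⟩)
  rw [h1, h2]
  exact ⟨hfree, hk, hi⟩

-- inserting the fresh root r preserves the invariant and adds r to the key set
theorem insert_root_inv {d : PySem.Dict Int Int} {r : Int} (hInv : DictInv d) :
    DictInv (d.insert r (r + 1)) ∧
      ∀ z, z ∈ (d.insert r (r + 1)).keys ↔ z = r ∨ z ∈ d.keys := by
  have hmem : ∀ z, z ∈ (d.insert r (r + 1)).keys ↔ z = r ∨ z ∈ d.keys :=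
    fun z => PySem.Dict.mem_keys_insert d r z (r + 1)
  refine ⟨?_, hmem⟩
  intro q v hq
  rw [PySem.Dict.get?_insert] at hq
  split_ifs at hq with hqr
  · subst hqr
    obtain rfl : v = q + 1 := by injection hq with h; omega
    exact ⟨by omega, fun z h1 h2 => (hmem z).2 (Or.inl (by omega))⟩
  · obtain ⟨h1, h2⟩ := hInv q v hq
    exact ⟨h1, fun z hz1 hz2 => (hmem z).2 (Or.inr (h2 z hz1 hz2))⟩

-- ---------- B side ----------

-- z lies in one of the occupied intervals
def Occ (z : Int) (ivs : List (Int × Int)) : Prop := ∃ p ∈ ivs, p.1 ≤ z ∧ z < p.2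

-- B's invariant: intervals are nonempty, and each one lies strictly left of all later starts
def IvInv : List (Int × Int) → Prop
  | [] => True
  | (s, e) :: rest => s < e ∧ (∀ p ∈ rest, e < p.1) ∧ IvInv rest

theorem occ_nil (z : Int) : ¬ Occ z [] := by simp [Occ]

theorem occ_cons (z s e : Int) (rest : List (Int × Int)) :
    Occ z ((s, e) :: rest) ↔ (s ≤ z ∧ z < e) ∨ Occ z rest := by
  simp [Occ]

-- the central lemma: one B step returns the first free room and occupies exactly it
theorem stepB_spec :
    ∀ (ivs : List (Int × Int)) (x : Int), IvInv ivs →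
      FirstFree (Occ · ivs) x (stepB ivs x).1 ∧ IvInv (stepB ivs x).2 ∧
        (∀ z, Occ z (stepB ivs x).2 ↔ z = (stepB ivs x).1 ∨ Occ z ivs) ∧
        (∀ p ∈ (stepB ivs x).2, p.1 = x ∨ ∃ q ∈ ivs, q.1 = p.1) := by
  intro ivs
  induction ivs with
  | nil =>
    intro x _
    have hstep : stepB ([] : List (Int × Int)) x = (x, [(x, x + 1)]) := rfl
    rw [hstep]
    refine ⟨⟨le_refl x, occ_nil x, fun z h1 h2 => absurd h2 (by omega)⟩, ?_, ?_, ?_⟩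
    · exact ⟨by omega, by simp, trivial⟩
    · intro z
      show Occ z [(x, x + 1)] ↔ z = x ∨ Occ z []
      rw [occ_cons]
      constructor
      · rintro (h | h)
        · exact Or.inl (by omega)
        · exact absurd h (occ_nil z)
      · rintro (rfl | h)
        · exact Or.inl (by omega)
        · exact absurd h (occ_nil z)
    · intro p hp
      rw [List.mem_singleton] at hp
      subst hp
      exact Or.inl rfl
  | cons hd rest ih =>
    obtain ⟨s, e⟩ := hd
    intro x hInv
    obtain ⟨hse, hlater, hInvR⟩ := hInv
    by_cases hex : e < x
    · -- skipped interval: reduce to the tail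
      have hstep : stepB ((s, e) :: rest) x = ((stepB rest x).1, (s, e) :: (stepB rest x).2) := by
        simp [stepB, skipB, hex]
      obtain ⟨hfree, hinv', hocc', hst'⟩ := ih x hInvR
      rw [hstep]
      refine ⟨?_, ?_, ?_, ?_⟩
      · -- lift FirstFree: the interval [s,e) lies entirely below x
        obtain ⟨hxr, hnr, hall⟩ := hfree
        refine ⟨hxr, ?_, fun z h1 h2 => ?_⟩
        · intro hOc
          rcases (occ_cons _ _ _ _).1 hOc with h | h
          · omega
          · exact hnr h
        · exact (occ_cons _ _ _ _).2 (Or.inr (hall z h1 h2))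
      · refine ⟨hse, ?_, hinv'⟩
        intro p hp
        rcases hst' p hp with h | ⟨q, hq, hqe⟩
        · omega
        · have := hlater q hq; omega
      · intro z
        show Occ z ((s, e) :: (stepB rest x).2) ↔ z = (stepB rest x).1 ∨ Occ z ((s, e) :: rest)
        rw [occ_cons, hocc', occ_cons]
        constructor
        · rintro (h | h | h)
          · exact Or.inr (Or.inl h)
          · exact Or.inl h
          · exact Or.inr (Or.inr h)
        · rintro (h | h | h)
          · exact Or.inr (Or.inl h)
          · exact Or.inl h
          · exact Or.inr (Or.inr h)
      · intro p hp
        rw [List.mem_cons] at hp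
        rcases hp with h | hp'
        · exact Or.inr ⟨(s, e), List.mem_cons_self .., by rw [h]⟩
        · rcases hst' p hp' with h | ⟨q, hq, hqe⟩
          · exact Or.inl h
          · exact Or.inr ⟨q, List.mem_cons_of_mem _ hq, hqe⟩
    · -- x ≤ e: skip stops here, headB acts on (s,e) :: rest
      have hxe : x ≤ e := by omega
      have hstep : stepB ((s, e) :: rest) x = headB ((s, e) :: rest) x := by
        simp [stepB, skipB, hex]
      rw [hstep]
      by_cases h1 : x + 1 < s
      · -- new singleton interval before (s,e)
        have hh : headB ((s, e) :: rest) x = (x, (x, x + 1) :: (s, e) :: rest) := by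
          simp [headB, h1]
        rw [hh]
        have hnocc : ¬ Occ x ((s, e) :: rest) := by
          intro hOc
          rcases (occ_cons _ _ _ _).1 hOc with h | h
          · omega
          · obtain ⟨q, hq, hq1, hq2⟩ := h
            have := hlater q hq; omega
        refine ⟨⟨le_refl x, hnocc, fun z hz1 hz2 => absurd hz2 (by omega)⟩, ?_, ?_, ?_⟩
        · refine ⟨by omega, ?_, hse, hlater, hInvR⟩
          intro p hp
          rw [List.mem_cons] at hp
          rcases hp with h | hp'
          · rw [h]; omega
          · have := hlater p hp'; omega
        · intro z
          show Occ z ((x, x + 1) :: (s, e) :: rest) ↔ z = x ∨ Occ z ((s, e) :: rest)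
          rw [occ_cons]
          constructor
          · rintro (h | h)
            · exact Or.inl (by omega)
            · exact Or.inr h
          · rintro (rfl | h)
            · exact Or.inl (by omega)
            · exact Or.inr h
        · intro p hp
          rw [List.mem_cons] at hp
          rcases hp with h | hp'
          · exact Or.inl (by rw [h])
          · exact Or.inr ⟨p, hp', rfl⟩
      · by_cases h2 : x + 1 = s
        · -- merge left: [x, e)
          have hh : headB ((s, e) :: rest) x = (x, (x, e) :: rest) := by
            simp [headB, h1, h2]
          rw [hh]
          have hnocc : ¬ Occ x ((s, e) :: rest) := by
            intro hOc
            rcases (occ_cons _ _ _ _).1 hOc with h | h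
            · omega
            · obtain ⟨q, hq, hq1, hq2⟩ := h
              have := hlater q hq; omega
          refine ⟨⟨le_refl x, hnocc, fun z hz1 hz2 => absurd hz2 (by omega)⟩, ?_, ?_, ?_⟩
          · exact ⟨by omega, hlater, hInvR⟩
          · intro z
            show Occ z ((x, e) :: rest) ↔ z = x ∨ Occ z ((s, e) :: rest)
            rw [occ_cons, occ_cons]
            constructor
            · rintro (h | h)
              · by_cases hz : z = x
                · exact Or.inl hz
                · exact Or.inr (Or.inl (by omega))
              · exact Or.inr (Or.inr h)
            · rintro (rfl | h | h)
              · exact Or.inl (by omega)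
              · exact Or.inl (by omega)
              · exact Or.inr h
          · intro p hp
            rw [List.mem_cons] at hp
            rcases hp with h | hp'
            · exact Or.inl (by rw [h])
            · exact Or.inr ⟨p, List.mem_cons_of_mem _ hp', rfl⟩
        · -- s ≤ x ≤ e: answer e, extend (and possibly merge right)
          have hsx : s ≤ x := by omega
          have hfree : FirstFree (Occ · ((s, e) :: rest)) x e := by
            refine ⟨hxe, ?_, fun z hz1 hz2 => ?_⟩
            · intro hOc
              rcases (occ_cons _ _ _ _).1 hOc with h | h
              · omega
              · obtain ⟨q, hq, hq1, hq2⟩ := h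
                have := hlater q hq; omega
            · exact (occ_cons _ _ _ _).2 (Or.inl (by omega))
          match rest, hlater, hInvR with
          | [], _, _ =>
            have hh : headB ((s, e) :: []) x = (e, [(s, e + 1)]) := by
              simp [headB, h1, h2]
            rw [hh]
            refine ⟨hfree, ⟨by omega, by simp, trivial⟩, ?_, ?_⟩
            · intro z
              show Occ z [(s, e + 1)] ↔ z = e ∨ Occ z ((s, e) :: [])
              rw [occ_cons, occ_cons]
              constructor
              · rintro (h | h)
                · by_cases hz : z = e
                  · exact Or.inl hz
                  · exact Or.inr (Or.inl (by omega))
                · exact absurd h (occ_nil z)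
              · rintro (rfl | h | h)
                · exact Or.inl (by omega)
                · exact Or.inl (by omega)
                · exact absurd h (occ_nil z)
            · intro p hp
              rw [List.mem_singleton] at hp
              subst hp
              exact Or.inr ⟨(s, e), List.mem_cons_self .., rfl⟩
          | (s2, e2) :: tail2, hlater, hInvR =>
            obtain ⟨hse2, hlater2, hInv2⟩ := hInvR
            have hes2 : e < s2 := hlater (s2, e2) (List.mem_cons_self ..)
            by_cases hm : s2 = e + 1
            · -- merge right
              have hh : headB ((s, e) :: (s2, e2) :: tail2) x = (e, (s, e2) :: tail2) := by
                simp [headB, h1, h2, hm]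
              rw [hh]
              refine ⟨hfree, ?_, ?_, ?_⟩
              · refine ⟨by omega, hlater2, hInv2⟩
              · intro z
                show Occ z ((s, e2) :: tail2) ↔ z = e ∨ Occ z ((s, e) :: (s2, e2) :: tail2)
                rw [occ_cons, occ_cons, occ_cons]
                constructor
                · rintro (h | h)
                  · by_cases hz : z = e
                    · exact Or.inl hz
                    · by_cases hz2 : z < e
                      · exact Or.inr (Or.inl (by omega))
                      · exact Or.inr (Or.inr (Or.inl (by omega)))
                  · exact Or.inr (Or.inr (Or.inr h))
                · rintro (rfl | h | h | h)
                  · exact Or.inl (by omega)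
                  · exact Or.inl (by omega)
                  · exact Or.inl (by omega)
                  · exact Or.inr h
              · intro p hp
                rw [List.mem_cons] at hp
                rcases hp with h | hp'
                · exact Or.inr ⟨(s, e), List.mem_cons_self .., by rw [h]⟩
                · exact Or.inr ⟨p, List.mem_cons_of_mem _ (List.mem_cons_of_mem _ hp'), rfl⟩
            · -- just extend
              have hh : headB ((s, e) :: (s2, e2) :: tail2) x =
                  (e, (s, e + 1) :: (s2, e2) :: tail2) := by
                simp [headB, h1, h2, hm]
              rw [hh]
              refine ⟨hfree, ?_, ?_, ?_⟩
              · refine ⟨by omega, ?_, hse2, hlater2, hInv2⟩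
                intro p hp
                rw [List.mem_cons] at hp
                rcases hp with h | hp'
                · rw [h]; omega
                · have := hlater2 p hp'; omega
              · intro z
                show Occ z ((s, e + 1) :: (s2, e2) :: tail2) ↔
                    z = e ∨ Occ z ((s, e) :: (s2, e2) :: tail2)
                rw [occ_cons, occ_cons, occ_cons, occ_cons]
                constructor
                · rintro (h | h)
                  · by_cases hz : z = e
                    · exact Or.inl hz
                    · exact Or.inr (Or.inl (by omega))
                  · exact Or.inr (Or.inr h)
                · rintro (rfl | h | h)
                  · exact Or.inl (by omega)
                  · exact Or.inl (by omega)
                  · exact Or.inr h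
              · intro p hp
                rw [List.mem_cons] at hp
                rcases hp with h | hp'
                · exact Or.inr ⟨(s, e), List.mem_cons_self .., by rw [h]⟩
                · exact Or.inr ⟨p, List.mem_cons_of_mem _ hp', rfl⟩

-- ---- the two main loops produce the same answer list ----
theorem loops_eq :
    ∀ (rooms : List Int) (dA : PySem.Dict Int Int) (ivs : List (Int × Int)) (acc : List Int),
      DictInv dA → IvInv ivs → (∀ z, z ∈ dA.keys ↔ Occ z ivs) →
      (rooms.foldl
        (fun (st : PySem.Dict Int Int × List Int) room =>
          let fr := findA st.1 room
          (fr.2.insert fr.1 (fr.1 + 1), st.2 ++ [fr.1])) (dA, acc)).2 =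
      (rooms.foldl
        (fun (st : List (Int × Int) × List Int) x =>
          let pr := stepB st.1 x
          (pr.2, st.2 ++ [pr.1])) (ivs, acc)).2 := by
  intro rooms
  induction rooms with
  | nil => intro dA ivs acc _ _ _; rfl
  | cons room rooms ih =>
    intro dA ivs acc hA hB hK
    obtain ⟨hfreeA, hkA, hiA⟩ := findA_spec dA room hA
    obtain ⟨hfreeB, hinvB, hoccB, _⟩ := stepB_spec ivs room hB
    have hroot : (findA dA room).1 = (stepB ivs room).1 :=
      FirstFree_unique (FirstFree_congr hK hfreeA) hfreeB
    obtain ⟨hiA', hmA⟩ := insert_root_inv (r := (findA dA room).1) hiA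
    rw [List.foldl_cons, List.foldl_cons]
    show (List.foldl _ ((findA dA room).2.insert (findA dA room).1 ((findA dA room).1 + 1),
          acc ++ [(findA dA room).1]) rooms).2 =
      (List.foldl _ ((stepB ivs room).2, acc ++ [(stepB ivs room).1]) rooms).2
    rw [hroot] at hiA' hmA ⊢
    apply ih
    · exact hiA'
    · exact hinvB
    · intro z
      have h1 := hmA z
      rw [hkA] at h1
      rw [h1, hoccB z, hK z]

-- ===== VERDICT (by name: the statement is the Claim_ definition above) =====
theorem solution_spec : Claim_equal_solution := by
  intro k room_number _
  unfold Spec_solution solution solution_alt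
  apply loops_eq
  · intro p v hp; rw [PySem.Dict.get?_empty] at hp; simp at hp
  · trivial
  · intro z; simp [PySem.Dict.keys_empty, occ_nil]
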